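-- pv_equiv track=rewrite | github.com/prajithravisankar/CBESS-public | main.py | formatMoves
-- ===== SOURCE A (Python) =====
-- def formatMoves(moveList: list, maxPlies: int) -> str:
--     """
--     Format moves into algebraic notation with move numbers
--     :param moveList: list of moves
--     :param maxPlies: max number of moves to display
--     :return: a string with move numbers formatted and moves in algebraic notation
--     """
--     formatted = []
--     moveNumber = 1
--     i = 0
--     while i < maxPlies and i < len(moveList):
--         if i + 1 < len(moveList):
--             formatted.append(f"{moveNumber}. {moveList[i]} {moveList[i + 1]}")
--             i += 2
--         else:
--             formatted.append(f"{moveNumber}. {moveList[i]}")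
--             i += 1
--         moveNumber += 1
--     return "\n".join(formatted)
-- ===== SOURCE B (Python) =====
-- def formatMoves(moveList: list, maxPlies: int) -> str:
--     """
--     Format moves into algebraic notation with move numbers
--     :param moveList: list of moves
--     :param maxPlies: max number of moves to display
--     :return: a string with move numbers formatted and moves in algebraic notation
--     """
--     it = iter(moveList)
--     pairs = list(zip(it, it))              # consecutive (white, black) move pairs
--     shown = min(maxPlies, len(moveList))   # effective ply cutoff
--     nLines = max(0, -(-shown // 2))        # number of numbered lines = ceil(shown / 2)
--     lines = [f"{n}. {w} {b}" for n, (w, b) in enumerate(pairs[:nLines], start=1)]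
--     if len(moveList) % 2 == 1 and nLines > len(pairs):
--         lines.append(f"{nLines}. {moveList[-1]}")
--     return "\n".join(lines)
-- ===== Notes on version B (the rewrite author's own statement) =====
-- stated objective: alternative
-- what changed: Replaces A's stateful while-loop (move-number counter, index stepped by 1 or 2, branch per step) with staged passes: chunk the list into (white, black) pairs via the zip(it, it) idiom, number the first ceil(min(maxPlies, len)/2) pairs with enumerate, then append the unpaired final move as its own line when it is shown.
import Mathlib
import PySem

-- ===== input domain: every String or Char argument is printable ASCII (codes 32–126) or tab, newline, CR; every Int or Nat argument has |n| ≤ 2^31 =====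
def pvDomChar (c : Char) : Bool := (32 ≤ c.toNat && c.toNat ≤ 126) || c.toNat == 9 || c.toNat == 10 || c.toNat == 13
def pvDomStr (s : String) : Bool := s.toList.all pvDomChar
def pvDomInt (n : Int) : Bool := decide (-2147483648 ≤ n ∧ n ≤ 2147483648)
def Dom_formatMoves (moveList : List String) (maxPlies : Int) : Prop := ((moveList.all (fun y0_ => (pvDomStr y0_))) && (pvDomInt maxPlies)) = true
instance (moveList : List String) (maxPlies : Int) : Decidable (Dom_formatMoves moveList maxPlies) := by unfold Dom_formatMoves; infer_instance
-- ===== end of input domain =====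

-- B replaces A's stateful while-loop (counter + index stepped by 1 or 2 with a branch per step) by
-- staged passes: first chunk the list into (white, black) pairs with the zip(it, it) idiom, then
-- number the first ceil(min(maxPlies, len)/2) pairs with enumerate, then append the unpaired final
-- move as its own line when it is shown; same output, a different decomposition of the task.

-- ===== PORT A =====
def formatMovesLoop (moveList : List String) (maxPlies : Int)
    (formatted : List String) (moveNumber i : Int) : List String :=
  if i < maxPlies ∧ i < (moveList.length : Int) then
    if i + 1 < (moveList.length : Int) then
      formatMovesLoop moveList maxPlies
        (formatted ++ [PySem.Int.toStr moveNumber ++ ". " ++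
          PySem.List.pyGetD moveList i "" ++ " " ++ PySem.List.pyGetD moveList (i + 1) ""])
        (moveNumber + 1) (i + 2)
    else
      formatMovesLoop moveList maxPlies
        (formatted ++ [PySem.Int.toStr moveNumber ++ ". " ++ PySem.List.pyGetD moveList i ""])
        (moveNumber + 1) (i + 1)
  else formatted
termination_by ((moveList.length : Int) - i).toNat
decreasing_by all_goals omega

def formatMoves (moveList : List String) (maxPlies : Int) : String :=
  PySem.Str.join "\n" (formatMovesLoop moveList maxPlies [] 1 0)

-- ===== PORT B =====
-- list(zip(it, it)) over an iterator of the list = consecutive disjoint pairs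
def chunkPairs : List String → List (String × String)
  | a :: b :: t => (a, b) :: chunkPairs t
  | _ => []

def formatMoves_alt (moveList : List String) (maxPlies : Int) : String :=
  let pairs := chunkPairs moveList
  let shown : Int := min maxPlies (moveList.length : Int)
  -- max(0, -(-shown // 2)) = ceil(shown / 2), clamped at 0
  let nLines : Int := max 0 (-(PySem.Int.floordiv (-shown) 2))
  let lines := (PySem.List.enumerate (PySem.List.slice pairs none (some nLines)) 1).map
    (fun np => PySem.Int.toStr np.1 ++ ". " ++ np.2.1 ++ " " ++ np.2.2)
  -- moveList[-1] via pyGetD: the branch is only taken when len(moveList) is odd, hence nonempty,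
  -- so Python's moveList[-1] cannot raise and the default "" is never used
  let lines := if PySem.Int.mod (moveList.length : Int) 2 == 1 ∧ (pairs.length : Int) < nLines then
      lines ++ [PySem.Int.toStr nLines ++ ". " ++ PySem.List.pyGetD moveList (-1) ""]
    else lines
  PySem.Str.join "\n" lines

-- ===== PRECONDITION & SPEC =====
def Spec_formatMoves (moveList : List String) (maxPlies : Int) (out : String) : Prop := out = formatMoves_alt moveList maxPlies
instance (moveList : List String) (maxPlies : Int) (out : String) : Decidable (Spec_formatMoves moveList maxPlies out) := by unfold Spec_formatMoves; infer_instance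

-- ===== CLAIM (what is proved, stated in full; the proofs are below) =====
def Claim_equal_formatMoves : Prop := ∀ (moveList : List String) (maxPlies : Int), Dom_formatMoves moveList maxPlies → Spec_formatMoves moveList maxPlies (formatMoves moveList maxPlies)

-- ===== LEMMAS AND PROOFS =====

-- the common "list of formatted lines" both programs produce: consume the remaining moves two at a
-- time, numbering from n, while the remaining ply budget is positive
def goldLines : List String → Int → Int → List String
  | [], _, _ => []
  | [a], n, plies => if 0 < plies then [PySem.Int.toStr n ++ ". " ++ a] else []
  | a :: b :: t, n, plies =>
      if 0 < plies then (PySem.Int.toStr n ++ ". " ++ a ++ " " ++ b) :: goldLines t (n + 1) (plies - 2)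
      else []

theorem goldLines_nonpos (rest : List String) (n plies : Int) (h : plies ≤ 0) :
    goldLines rest n plies = [] := by
  match rest with
  | [] => rfl
  | [a] => rw [goldLines, if_neg (by omega)]
  | a :: b :: t => rw [goldLines, if_neg (by omega)]

theorem floordiv_two (a : Int) : PySem.Int.floordiv a 2 = a / 2 := by
  simp [PySem.Int.floordiv]; rw [Int.fdiv_eq_ediv]; omega

theorem chunkPairs_length (L : List String) : (chunkPairs L).length = L.length / 2 := by
  match L with
  | [] => rfl
  | [a] => simp [chunkPairs]
  | a :: b :: t => simp [chunkPairs, chunkPairs_length t]; omega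

theorem getLastD_cons_cons (a b : String) (t : List String) (ht : t ≠ []) :
    (a :: b :: t).getLastD "" = t.getLastD "" := by
  cases t with
  | nil => simp at ht
  | cons x t' => simp

theorem pyGetD_neg_one (L : List String) (h : L ≠ []) :
    PySem.List.pyGetD L (-1) "" = L.getLastD "" := by
  have hl : 1 ≤ L.length := List.length_pos_iff.mpr h
  simp [PySem.List.pyGetD, PySem.List.pyGet?, PySem.List.pyIdx?, hl,
    List.getLastD_eq_getLast?, List.getLast?_eq_getElem?]

-- A's while loop produces goldLines of the tail, with number m+1 and the remaining ply budget
theorem loop_eq (L : List String) (maxP : Int) :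
    ∀ (f m : Nat) (acc : List String), L.length ≤ 2 * m + f →
      formatMovesLoop L maxP acc ((m : Int) + 1) (2 * (m : Int)) =
        acc ++ goldLines (L.drop (2 * m)) ((m : Int) + 1) (min maxP (L.length : Int) - 2 * (m : Int)) := by
  intro f
  induction f with
  | zero =>
    intro m acc hle
    rw [formatMovesLoop, if_neg (by omega), List.drop_eq_nil_of_le (by omega)]
    simp [goldLines]
  | succ f ih =>
    intro m acc hle
    rw [formatMovesLoop]
    by_cases hc : 2 * (m : Int) < maxP ∧ 2 * (m : Int) < (L.length : Int)
    · rw [if_pos hc]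
      have hm2 : 2 * m < L.length := by omega
      by_cases hp : 2 * (m : Int) + 1 < (L.length : Int)
      · have hm21 : 2 * m + 1 < L.length := by omega
        rw [if_pos hp]
        have h1 : (2 * (m : Int) + 2) = 2 * ((m + 1 : Nat) : Int) := by push_cast; ring
        have h2 : ((m : Int) + 1 + 1) = ((m + 1 : Nat) : Int) + 1 := by push_cast; ring
        rw [h1, h2, ih (m + 1) _ (by omega)]
        rw [List.drop_eq_getElem_cons hm2,
          (by omega : 2 * m + 1 = 2 * m + 1),
          show L.drop (2 * m + 1) = L[2 * m + 1] :: L.drop (2 * m + 2) from by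
            rw [← List.drop_eq_getElem_cons hm21]]
        rw [goldLines, if_pos (by omega)]
        rw [PySem.List.pyGetD_eq_getElem L "" (by omega) (by omega),
          PySem.List.pyGetD_eq_getElem L "" (by omega) (by omega)]
        have e1 : (2 * (m : Int)).toNat = 2 * m := by omega
        have e2 : (2 * (m : Int) + 1).toNat = 2 * m + 1 := by omega
        simp only [e1, e2, List.append_assoc, List.singleton_append]
        congr 3
        push_cast; ring
      · -- unpaired final move: L.length = 2m + 1
        have hlen : L.length = 2 * m + 1 := by omega
        rw [if_neg hp]
        rw [formatMovesLoop, if_neg (by omega)]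
        rw [List.drop_eq_getElem_cons hm2, List.drop_eq_nil_of_le (by omega)]
        rw [goldLines, if_pos (by omega)]
        rw [PySem.List.pyGetD_eq_getElem L "" (by omega) (by omega)]
        have e1 : (2 * (m : Int)).toNat = 2 * m := by omega
        simp [e1]
    · rw [if_neg hc]
      rw [goldLines_nonpos _ _ _ (by omega), List.append_nil]

-- B's staged construction produces the same goldLines, for any suffix rest and ply budget
theorem b_eq_gold (rest : List String) (n plies : Int) (h : plies ≤ (rest.length : Int)) :
    (PySem.List.enumerate
        ((chunkPairs rest).take (max 0 (-(PySem.Int.floordiv (-plies) 2))).toNat) n).map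
      (fun np => PySem.Int.toStr np.1 ++ ". " ++ np.2.1 ++ " " ++ np.2.2) ++
    (if rest.length % 2 = 1 ∧ (chunkPairs rest).length < (max 0 (-(PySem.Int.floordiv (-plies) 2))).toNat then
        [PySem.Int.toStr (n + ((chunkPairs rest).length : Int)) ++ ". " ++ rest.getLastD ""]
      else []) = goldLines rest n plies := by
  match rest with
  | [] =>
    have h0 : plies ≤ 0 := by simpa using h
    have hn : (max 0 (-(PySem.Int.floordiv (-plies) 2))).toNat = 0 := by
      rw [floordiv_two]; omega
    simp [hn, chunkPairs, PySem.List.enumerate, goldLines]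
  | [a] =>
    have h1 : plies ≤ 1 := by simpa using h
    by_cases hp : 0 < plies
    · have hpl : plies = 1 := by omega
      have hn : (max 0 (-(PySem.Int.floordiv (-plies) 2))).toNat = 1 := by
        rw [floordiv_two]; omega
      simp [hn, chunkPairs, PySem.List.enumerate, goldLines, hp]
      omega
    · have hn : (max 0 (-(PySem.Int.floordiv (-plies) 2))).toNat = 0 := by
        rw [floordiv_two]; omega
      simp [hn, chunkPairs, PySem.List.enumerate, goldLines, hp]
      omega
  | a :: b :: t =>
    by_cases hp : 0 < plies
    · have hlen : plies ≤ (t.length : Int) + 2 := by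
        simp at h; push_cast at h ⊢; omega
      have hn1 : 1 ≤ (max 0 (-(PySem.Int.floordiv (-plies) 2))).toNat := by
        rw [floordiv_two]; omega
      have hstep : (max 0 (-(PySem.Int.floordiv (-plies) 2))).toNat =
          (max 0 (-(PySem.Int.floordiv (-(plies - 2)) 2))).toNat + 1 := by
        rw [floordiv_two, floordiv_two]; omega
      have ih := b_eq_gold t (n + 1) (plies - 2) (by omega)
      rw [goldLines, if_pos hp, ← ih]
      rw [show chunkPairs (a :: b :: t) = (a, b) :: chunkPairs t from rfl]
      rw [hstep, List.take_succ_cons]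
      rw [show PySem.List.enumerate ((a, b) :: (chunkPairs t).take
            (max 0 (-(PySem.Int.floordiv (-(plies - 2)) 2))).toNat) n =
          (n, (a, b)) :: PySem.List.enumerate ((chunkPairs t).take
            (max 0 (-(PySem.Int.floordiv (-(plies - 2)) 2))).toNat) (n + 1) from by
        simp [PySem.List.enumerate]]
      rw [List.map_cons, List.cons_append]
      congr 1
      congr 1
      -- the two trailing-odd-move conditionals agree
      by_cases hodd : t.length % 2 = 1 ∧ (chunkPairs t).length <
          (max 0 (-(PySem.Int.floordiv (-(plies - 2)) 2))).toNat
      · have hne : t ≠ [] := by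
          intro he; rw [he] at hodd; simp at hodd
        have hcl : (chunkPairs (a :: b :: t)).length = (chunkPairs t).length + 1 := by
          simp [chunkPairs]
        rw [if_pos (by
          refine ⟨by simp; omega, ?_⟩
          simp only [List.length_cons]
          omega), if_pos hodd]
        rw [getLastD_cons_cons a b t hne]
        have harg : n + ((((a, b) :: chunkPairs t)).length : Int) =
            n + 1 + ((chunkPairs t).length : Int) := by
          simp only [List.length_cons]; push_cast; ring
        rw [harg]
      · rw [if_neg (by
          intro hcon
          apply hodd
          refine ⟨by have := hcon.1; simp at this; omega, ?_⟩
          have := hcon.2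
          simp only [List.length_cons] at this
          omega), if_neg hodd]
    · rw [goldLines_nonpos _ _ _ (by omega), floordiv_two]
      have hz : (max 0 (-(-plies / 2))).toNat = 0 := by omega
      rw [hz]
      simp [PySem.List.enumerate]

-- ===== VERDICT (by name: the statement is the Claim_ definition above) =====
theorem formatMoves_spec : Claim_equal_formatMoves := by
  intro L maxP _
  unfold Spec_formatMoves formatMoves formatMoves_alt
  have hA := loop_eq L maxP L.length 0 [] (by omega)
  norm_num at hA
  rw [hA]
  congr 1
  have hB := b_eq_gold L 1 (min maxP (L.length : Int)) (by omega)
  rw [← hB]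
  rw [PySem.List.slice_to _ (le_max_left _ _)]
  have hch := chunkPairs_length L
  by_cases hc : L.length % 2 = 1 ∧ (chunkPairs L).length <
      (max 0 (-(PySem.Int.floordiv (-(min maxP (L.length : Int))) 2))).toNat
  · have hne : L ≠ [] := by intro he; rw [he] at hc; simp at hc
    have hmod : PySem.Int.mod (L.length : Int) 2 = 1 := by
      simp [PySem.Int.mod]; rw [Int.fmod_eq_emod]; omega
    -- nLines = 1 + pairs.length when the odd tail is shown
    have hNval : max 0 (-(PySem.Int.floordiv (-(min maxP (L.length : Int))) 2)) =
        1 + ((chunkPairs L).length : Int) := by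
      have hc2 := hc.2
      rw [floordiv_two] at hc2 ⊢
      rcases min_cases maxP ((L.length : Int)) with ⟨he, hle⟩ | ⟨he, hle⟩ <;> rw [he] at hc2 ⊢ <;>
        omega
    rw [if_pos hc,
      if_pos (⟨by simp [hmod]; omega, by omega⟩ :
        (PySem.Int.mod (L.length : Int) 2 == 1) = true ∧
          ((chunkPairs L).length : Int) <
            max 0 (-(PySem.Int.floordiv (-(min maxP (L.length : Int))) 2)))]
    rw [hNval, pyGetD_neg_one L hne]
  · rw [if_neg hc,
      if_neg (show ¬((PySem.Int.mod (L.length : Int) 2 == 1) = true ∧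
          ((chunkPairs L).length : Int) <
            max 0 (-(PySem.Int.floordiv (-(min maxP (L.length : Int))) 2))) from by
        intro hcon
        apply hc
        obtain ⟨h1, h2⟩ := hcon
        simp [PySem.Int.mod] at h1
        rw [floordiv_two] at h2
        refine ⟨by omega, ?_⟩
        rw [floordiv_two]
        omega)]
    simp
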